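-- pv_equiv track=rewrite | github.com/anolik/DNSWatcher | app/checker/engine.py | _worst_of_statuses
-- ===== SOURCE A (Python) =====
-- _STATUS_SEVERITY: dict[str, int] = {
--     "ok": 0,
--     "info": 1,
--     "warning": 2,
--     "critical": 3,
--     "error": 4,
-- }
--
-- def _worst_of_statuses(statuses: list[str]) -> str:
--     """Return the worst status from a list of status strings.
--
--     Severity order: ok < info < warning < critical < error.
--     Returns "error" if the list is empty.
--     """
--     if not statuses:
--         return "error"
--
--     worst = "ok"
--     worst_severity = 0
--
--     for status in statuses:
--         severity = _STATUS_SEVERITY.get(status, 0)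
--         if severity > worst_severity:
--             worst_severity = severity
--             worst = status
--
--     return worst
-- ===== SOURCE B (Python) =====
-- _STATUS_SEVERITY: dict[str, int] = {
--     "ok": 0,
--     "info": 1,
--     "warning": 2,
--     "critical": 3,
--     "error": 4,
-- }
--
-- def _worst_of_statuses(statuses: list[str]) -> str:
--     """Return the worst status from a list of status strings.
--
--     Instead of scanning the input for an argmax, build a membership set
--     once and walk the canonical statuses from worst to best, returning
--     the first one present.  Unknown strings have severity 0, so if no
--     canonical status above "ok" is present the answer is "ok".
--     Returns "error" if the list is empty.
--     """
--     if not statuses: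
--         return "error"
--     present = set(statuses)
--     for status in ("error", "critical", "warning", "info"):
--         if status in present:
--             return status
--     return "ok"
-- ===== Notes on version B (the rewrite author's own statement) =====
-- stated objective: alternative
-- what changed: B inverts the traversal: instead of A's argmax loop over the input tracking (worst, worst_severity), B builds a membership set of the input once and walks the fixed severity table from worst to best, returning the first canonical status present (correct because every status with severity > 0 is its own canonical name).
import Mathlib
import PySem

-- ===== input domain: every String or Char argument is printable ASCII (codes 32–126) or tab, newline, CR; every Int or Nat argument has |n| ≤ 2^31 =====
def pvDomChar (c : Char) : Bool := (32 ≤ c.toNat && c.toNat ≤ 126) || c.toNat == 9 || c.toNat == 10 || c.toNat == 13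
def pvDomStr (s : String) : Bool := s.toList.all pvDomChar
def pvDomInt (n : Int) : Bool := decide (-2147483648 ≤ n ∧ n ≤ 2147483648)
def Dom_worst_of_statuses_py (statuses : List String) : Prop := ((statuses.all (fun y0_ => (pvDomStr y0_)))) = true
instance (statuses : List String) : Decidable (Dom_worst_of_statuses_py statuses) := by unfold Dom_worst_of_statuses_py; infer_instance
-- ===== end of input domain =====

-- B inverts the traversal: a membership set of the input plus a walk over the fixed
-- severity table from worst to best, instead of A's argmax loop; objective: alternative.

-- ===== PORT A =====
-- _STATUS_SEVERITY.get(status, 0): the literal dict's .get ported as an if-chain (exact: default 0)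
def pvSeverity (s : String) : Int :=
  if s = "ok" then 0
  else if s = "info" then 1
  else if s = "warning" then 2
  else if s = "critical" then 3
  else if s = "error" then 4
  else 0

def worst_of_statuses_py (statuses : List String) : String :=
  match statuses with
  | [] => "error"
  | _ :: _ =>
    -- for status in statuses: track (worst, worst_severity)
    let st := statuses.foldl
      (fun (acc : String × Int) status =>
        let severity := pvSeverity status
        if severity > acc.2 then (status, severity) else acc)
      ("ok", 0)
    st.1

-- ===== PORT B =====
def worst_of_statuses_py_alt (statuses : List String) : String :=
  match statuses with
  | [] => "error"
  | _ :: _ =>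
    -- present = set(statuses); first canonical status (worst to best) present, else "ok"
    let present : PySem.Set String := PySem.Set.ofList statuses
    match (["error", "critical", "warning", "info"].find?
        (fun status => PySem.Set.contains present status)) with
    | some status => status
    | none => "ok"

-- ===== PRECONDITION & SPEC =====
def Spec_worst_of_statuses_py (statuses : List String) (out : String) : Prop := out = worst_of_statuses_py_alt statuses
instance (statuses : List String) (out : String) : Decidable (Spec_worst_of_statuses_py statuses out) := by unfold Spec_worst_of_statuses_py; infer_instance

-- ===== CLAIM (what is proved, stated in full; the proofs are below) =====
def Claim_equal_worst_of_statuses_py : Prop := ∀ (statuses : List String), Dom_worst_of_statuses_py statuses → Spec_worst_of_statuses_py statuses (worst_of_statuses_py statuses)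

-- ===== LEMMAS AND PROOFS =====

theorem pvSeverity_bounds (s : String) : 0 ≤ pvSeverity s ∧ pvSeverity s ≤ 4 := by
  unfold pvSeverity; split_ifs <;> norm_num

-- characterisation of A's argmax fold as a worst-to-best membership chain
theorem foldA_chain (l : List String) (w : String) (ws : Int)
    (hw : pvSeverity w = ws) :
    (l.foldl (fun (acc : String × Int) status =>
        let severity := pvSeverity status
        if severity > acc.2 then (status, severity) else acc) (w, ws)).1 =
      (if "error" ∈ l ∧ ws < 4 then "error"
       else if "critical" ∈ l ∧ ws < 3 then "critical"
       else if "warning" ∈ l ∧ ws < 2 then "warning"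
       else if "info" ∈ l ∧ ws < 1 then "info"
       else w) := by
  induction l generalizing w ws with
  | nil => simp
  | cons s t ih =>
    have hbw := pvSeverity_bounds w
    simp only [List.foldl_cons]
    by_cases h4 : s = "error"
    · subst h4
      have hv : pvSeverity "error" = 4 := by decide
      simp only [hv]
      by_cases h : (4:Int) > ws
      · rw [if_pos h, ih "error" 4 hv]
        simp [h]
      · rw [if_neg h, ih w ws hw]
        simp [h, (show ¬ ws < 3 by omega), (show ¬ ws < 2 by omega), (show ¬ ws < 1 by omega)]
    · by_cases h3 : s = "critical"
      · subst h3
        have hv : pvSeverity "critical" = 3 := by decide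
        simp only [hv]
        by_cases h : (3:Int) > ws
        · rw [if_pos h, ih "critical" 3 hv]
          by_cases he : "error" ∈ t <;> simp [he, h, (show ws < 4 by omega)]
        · rw [if_neg h, ih w ws hw]
          simp [h, (show ¬ ws < 2 by omega), (show ¬ ws < 1 by omega)]
      · by_cases h2 : s = "warning"
        · subst h2
          have hv : pvSeverity "warning" = 2 := by decide
          simp only [hv]
          by_cases h : (2:Int) > ws
          · rw [if_pos h, ih "warning" 2 hv]
            by_cases he : "error" ∈ t <;> by_cases hcr : "critical" ∈ t <;>
              simp [he, hcr, h, (show ws < 4 by omega), (show ws < 3 by omega)]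
          · rw [if_neg h, ih w ws hw]
            simp [h, (show ¬ ws < 1 by omega)]
        · by_cases h1 : s = "info"
          · subst h1
            have hv : pvSeverity "info" = 1 := by decide
            simp only [hv]
            by_cases h : (1:Int) > ws
            · rw [if_pos h, ih "info" 1 hv]
              by_cases he : "error" ∈ t <;> by_cases hcr : "critical" ∈ t <;>
                by_cases hwa : "warning" ∈ t <;>
                simp [he, hcr, hwa, h, (show ws < 4 by omega), (show ws < 3 by omega),
                  (show ws < 2 by omega)]
            · rw [if_neg h, ih w ws hw]
              simp [h]
          · -- severity 0 (either "ok" or an unknown string): state unchanged, memberships unchanged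
            have hs0 : pvSeverity s = 0 := by
              unfold pvSeverity; split_ifs <;> simp_all
            simp only [hs0]
            rw [if_neg (by omega), ih w ws hw]
            have n4 : ¬ ("error" = s) := fun hh => h4 hh.symm
            have n3 : ¬ ("critical" = s) := fun hh => h3 hh.symm
            have n2 : ¬ ("warning" = s) := fun hh => h2 hh.symm
            have n1 : ¬ ("info" = s) := fun hh => h1 hh.symm
            simp [n4, n3, n2, n1]

-- ===== VERDICT (by name: the statement is the Claim_ definition above) =====
theorem worst_of_statuses_py_spec : Claim_equal_worst_of_statuses_py := by
  intro statuses _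
  unfold Spec_worst_of_statuses_py worst_of_statuses_py worst_of_statuses_py_alt
  match statuses with
  | [] => rfl
  | h :: t =>
    rw [foldA_chain (h :: t) "ok" 0 rfl]
    simp only [List.find?, PySem.Set.contains]
    by_cases he : "error" ∈ h :: t <;> by_cases hcr : "critical" ∈ h :: t <;>
      by_cases hwa : "warning" ∈ h :: t <;> by_cases hi : "info" ∈ h :: t <;>
      simp [he, hcr, hwa, hi, PySem.Set.mem_ofList]
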